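-- pv_equiv track=rewrite | github.com/EMKF/Indicators-PythonLibrary | kauffman/data/_qwi.py | _check_loop_group
-- ===== SOURCE A (Python) =====
-- def _check_loop_group(group, target, winning_combo):
--     product = 1
--     for c in group.values():
--         product *= c
--
--     if product <= target:
--         if product > winning_combo[1]:
--             return ([k for k in group.keys()], product)
--         else:
--             return winning_combo
--
--     for k in group.keys():
--         combo_subset = group.copy()
--         combo_subset.pop(k)
--         winning_combo = _check_loop_group(combo_subset, target, winning_combo)
--
--     return winning_combo
-- ===== SOURCE B (Python) =====
-- def _check_loop_group(group, target, winning_combo):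
--     # Stage 1: gather the DFS candidate list, pruning sub-dicts (by key tuple)
--     # already visited; stage 2: pick the first strict improvement over winning_combo.
--     seen = set()
--
--     def candidates(g):
--         key = tuple(g)
--         if key in seen:
--             return []
--         seen.add(key)
--         p = 1
--         for c in g.values():
--             p *= c
--         if p <= target:
--             return [(list(g), p)]
--         out = []
--         for k in g:
--             sub = dict(g)
--             del sub[k]
--             out += candidates(sub)
--         return out
--
--     best = winning_combo
--     for cand in candidates(group):
--         if cand[1] > best[1]:
--             best = cand
--     return best
-- ===== Notes on version B (the rewrite author's own statement) =====
-- stated objective: alternative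
-- what changed: Replaces A's single-pass recursion that threads the running best through an unmemoized permutation-order search with a two-stage design: a candidate generator that prunes already-visited sub-dicts via a seen set of key tuples (each subset explored once, in A's DFS order), followed by a separate first-strict-improvement selection pass over the gathered candidates.
import Mathlib
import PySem

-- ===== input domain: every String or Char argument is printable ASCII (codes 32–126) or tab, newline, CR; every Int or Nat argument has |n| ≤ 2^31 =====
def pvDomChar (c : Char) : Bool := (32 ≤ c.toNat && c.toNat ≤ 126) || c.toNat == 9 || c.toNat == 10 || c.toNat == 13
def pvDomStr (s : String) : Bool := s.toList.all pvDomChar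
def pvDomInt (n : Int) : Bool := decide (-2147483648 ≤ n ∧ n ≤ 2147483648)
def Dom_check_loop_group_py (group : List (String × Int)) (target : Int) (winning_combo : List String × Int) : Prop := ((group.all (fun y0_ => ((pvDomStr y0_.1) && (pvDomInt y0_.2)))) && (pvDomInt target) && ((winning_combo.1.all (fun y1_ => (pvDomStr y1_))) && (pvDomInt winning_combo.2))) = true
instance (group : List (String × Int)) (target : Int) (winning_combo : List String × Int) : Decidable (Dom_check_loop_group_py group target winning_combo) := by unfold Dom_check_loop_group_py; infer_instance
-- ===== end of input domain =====

-- B replaces A's single-pass best-threading, unmemoized recursion by two stages: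
-- a candidate generator pruning already-visited sub-dicts via a seen set of key
-- tuples, then a separate first-strict-improvement selection pass.

-- erasing a present key strictly shrinks the item list (termination of port A)
theorem pvEraseLen {g : PySem.Dict String Int} {k : String} (hk : k ∈ g.keys) :
    (g.erase k).items.length < g.items.length := by
  have h : ∃ p ∈ g.items, ¬ (!(p.1 == k)) = true := by
    rcases List.mem_map.mp hk with ⟨p, hp, hpk⟩
    exact ⟨p, hp, by simp [hpk]⟩
  simpa [PySem.Dict.erase] using List.length_filter_lt_length_iff_exists.mpr h

-- ===== PORT A =====
mutual
-- product over values; if ≤ target compare with the running best, else recurse on each key removal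
def check_loop_group_py_go (target : Int) (g : PySem.Dict String Int)
    (wc : List String × Int) : List String × Int :=
  let product := g.values.foldl (fun a c => a * c) 1
  if product ≤ target then
    if product > wc.2 then (g.keys, product) else wc
  else
    check_loop_group_py_loop target g g.keys.attach wc
termination_by (g.items.length, 1, 0)

-- the 'for k in group.keys()' loop threading winning_combo
def check_loop_group_py_loop (target : Int) (g : PySem.Dict String Int)
    (ks : List {k // k ∈ g.keys}) (wc : List String × Int) : List String × Int :=
  match ks with
  | [] => wc
  | k :: rest =>
      check_loop_group_py_loop target g rest
        (check_loop_group_py_go target (g.erase k.1) wc)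
termination_by (g.items.length, 0, ks.length)
decreasing_by
  · exact Prod.Lex.left _ _ (pvEraseLen k.2)
  · exact Prod.Lex.right _ (Prod.Lex.right _ (Nat.lt_succ_self _))
end

def check_loop_group_py (group : List (String × Int)) (target : Int)
    (winning_combo : List String × Int) : List String × Int :=
  check_loop_group_py_go target (PySem.Dict.ofList group) winning_combo

-- ===== PORT B =====
-- stage 1, `candidates`: the DFS candidate list, skipping a sub-dict whose key
-- tuple is in `seen`; fuel makes the recursion structural (never exhausted when
-- fuel > |g|, since deleting a key shrinks the dict)
def check_loop_group_py_alt_cands (target : Int) :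
    Nat → PySem.Dict String Int → List (List String) →
    List (List String × Int) × List (List String)
  | 0, _, seen => ([], seen)
  | fuel + 1, g, seen =>
    if g.keys ∈ seen then ([], seen)
    else
      let seen1 := PySem.Set.add seen g.keys
      let product := g.values.foldl (fun a c => a * c) 1
      if product ≤ target then ([(g.keys, product)], seen1)
      else
        g.keys.foldl
          (fun acc k =>
            let r := check_loop_group_py_alt_cands target fuel (g.erase k) acc.2
            (acc.1 ++ r.1, r.2))
          ([], seen1)

-- stage 2: scan the candidate list for the first strict improvement on winning_combo
def check_loop_group_py_alt (group : List (String × Int)) (target : Int)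
    (winning_combo : List String × Int) : List String × Int :=
  let g := PySem.Dict.ofList group
  let cands := (check_loop_group_py_alt_cands target (g.items.length + 1) g []).1
  cands.foldl (fun best cand => if cand.2 > best.2 then cand else best) winning_combo

-- ===== PRECONDITION & SPEC =====
def Spec_check_loop_group_py (group : List (String × Int)) (target : Int) (winning_combo : List String × Int) (out : List String × Int) : Prop := out = check_loop_group_py_alt group target winning_combo
instance (group : List (String × Int)) (target : Int) (winning_combo : List String × Int) (out : List String × Int) : Decidable (Spec_check_loop_group_py group target winning_combo out) := by unfold Spec_check_loop_group_py; infer_instance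

-- ===== CLAIM (what is proved, stated in full; the proofs are below) =====
def Claim_equal_check_loop_group_py : Prop := ∀ (group : List (String × Int)) (target : Int) (winning_combo : List String × Int), Dom_check_loop_group_py group target winning_combo → Spec_check_loop_group_py group target winning_combo (check_loop_group_py group target winning_combo)

-- ===== LEMMAS AND PROOFS =====

-- the selection step both programs apply to each candidate (keys, product) pair
def pvStep (a c : List String × Int) : List String × Int := if c.2 > a.2 then c else a

-- the candidate pairs A's recursion compares against the running best, in DFS order
mutual
def pvCands (target : Int) (g : PySem.Dict String Int) : List (List String × Int) :=
  let product := g.values.foldl (fun a c => a * c) 1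
  if product ≤ target then [(g.keys, product)]
  else pvCandsList target g g.keys.attach
termination_by (g.items.length, 1, 0)

def pvCandsList (target : Int) (g : PySem.Dict String Int)
    (ks : List {k // k ∈ g.keys}) : List (List String × Int) :=
  match ks with
  | [] => []
  | k :: rest => pvCands target (g.erase k.1) ++ pvCandsList target g rest
termination_by (g.items.length, 0, ks.length)
decreasing_by
  · exact Prod.Lex.left _ _ (pvEraseLen k.2)
  · exact Prod.Lex.right _ (Prod.Lex.right _ (Nat.lt_succ_self _))
end

theorem pvStep_ge_left (a c : List String × Int) : a.2 ≤ (pvStep a c).2 := by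
  unfold pvStep; split_ifs with h <;> omega

theorem pvStep_ge_right (a c : List String × Int) : c.2 ≤ (pvStep a c).2 := by
  unfold pvStep; split_ifs with h <;> omega

theorem pvFold_ge_init (l : List (List String × Int)) (wc : List String × Int) :
    wc.2 ≤ (l.foldl pvStep wc).2 := by
  induction l generalizing wc with
  | nil => exact le_refl _
  | cons c t ih => exact le_trans (pvStep_ge_left wc c) (ih (pvStep wc c))

theorem pvFold_ge_mem (l : List (List String × Int)) (wc c : List String × Int)
    (hc : c ∈ l) : c.2 ≤ (l.foldl pvStep wc).2 := by
  induction l generalizing wc with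
  | nil => cases hc
  | cons d t ih =>
      rcases List.mem_cons.mp hc with h | h
      · subst h; exact le_trans (pvStep_ge_right wc c) (pvFold_ge_init t _)
      · exact ih _ h

theorem pvFold_const (l : List (List String × Int)) (wc : List String × Int)
    (h : ∀ c ∈ l, c.2 ≤ wc.2) : l.foldl pvStep wc = wc := by
  induction l with
  | nil => rfl
  | cons c t ih =>
      have hc : pvStep wc c = wc := by
        unfold pvStep; split_ifs with hgt
        · exact absurd (h c (by simp)) (by omega)
        · rfl
      simp only [List.foldl_cons, hc]
      exact ih (fun d hd => h d (List.mem_cons_of_mem _ hd))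

-- A computes the fold of pvStep over its candidate list
theorem pvA_main (target : Int) :
    ∀ (N : ℕ) (g : PySem.Dict String Int), g.items.length ≤ N →
      ∀ wc, check_loop_group_py_go target g wc = (pvCands target g).foldl pvStep wc := by
  intro N
  induction N using Nat.strong_induction_on with
  | _ N IH =>
    intro g hg wc
    rw [check_loop_group_py_go, pvCands]
    by_cases hp : g.values.foldl (fun a c => a * c) 1 ≤ target
    · simp only [if_pos hp, List.foldl_cons, List.foldl_nil, pvStep]
    · simp only [if_neg hp]
      have hloop : ∀ (ks : List {k // k ∈ g.keys}) (wc : List String × Int),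
          check_loop_group_py_loop target g ks wc
            = (pvCandsList target g ks).foldl pvStep wc := by
        intro ks
        induction ks with
        | nil => intro wc; rw [check_loop_group_py_loop, pvCandsList, List.foldl_nil]
        | cons k rest ihks =>
            intro wc
            rw [check_loop_group_py_loop, pvCandsList, List.foldl_append, ihks,
              IH ((g.erase k.1).items.length) (lt_of_lt_of_le (pvEraseLen k.2) hg) _
                (le_refl _)]
      exact hloop _ wc

-- sublists of a list with nodup keys are determined by their key lists
theorem pvKeysInj : ∀ (l0 l1 l2 : List (String × Int)),
    l1.Sublist l0 → l2.Sublist l0 → (l0.map Prod.fst).Nodup →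
    l1.map Prod.fst = l2.map Prod.fst → l1 = l2 := by
  intro l0
  induction l0 with
  | nil =>
      intro l1 l2 h1 h2 _ _
      rw [List.sublist_nil] at h1 h2; rw [h1, h2]
  | cons x t ih =>
      intro l1 l2 h1 h2 hnd hk
      rw [List.map_cons, List.nodup_cons] at hnd
      obtain ⟨hx, hndt⟩ := hnd
      rcases List.sublist_cons_iff.mp h1 with h1t | ⟨r1, rfl, h1t⟩
      · rcases List.sublist_cons_iff.mp h2 with h2t | ⟨r2, rfl, h2t⟩
        · exact ih _ _ h1t h2t hndt hk
        · exfalso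
          have hm : x.1 ∈ l1.map Prod.fst := by rw [hk]; simp
          exact hx ((h1t.map Prod.fst).subset hm)
      · rcases List.sublist_cons_iff.mp h2 with h2t | ⟨r2, rfl, h2t⟩
        · exfalso
          have hm : x.1 ∈ l2.map Prod.fst := by rw [← hk]; simp
          exact hx ((h2t.map Prod.fst).subset hm)
        · have hk' : r1.map Prod.fst = r2.map Prod.fst := by simpa using hk
          rw [ih _ _ h1t h2t hndt hk']

-- two sub-dicts of a nodup-keyed dict with the same key list are equal
theorem pvDictInj {g0 g1 g2 : PySem.Dict String Int} (h0 : g0.keys.Nodup)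
    (h1 : g1.items.Sublist g0.items) (h2 : g2.items.Sublist g0.items)
    (hk : g1.keys = g2.keys) : g1 = g2 :=
  PySem.Dict.ext (pvKeysInj g0.items g1.items g2.items h1 h2 h0 hk)

-- list form of pvEraseLenExact
theorem pvFilterLen : ∀ (l : List (String × Int)) (k : String),
    (l.map Prod.fst).Nodup → k ∈ l.map Prod.fst →
    (l.filter (fun p => !(p.1 == k))).length + 1 = l.length := by
  intro l k
  induction l with
  | nil => intro _ h; cases h
  | cons p t ih =>
      intro hnd hk
      rw [List.map_cons, List.nodup_cons] at hnd
      obtain ⟨hp, hndt⟩ := hnd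
      by_cases hpk : p.1 = k
      · subst hpk
        have ht : t.filter (fun q => !(q.1 == p.1)) = t := by
          apply List.filter_eq_self.mpr
          intro q hq
          have hq1 : q.1 ≠ p.1 := fun h => hp (h ▸ List.mem_map_of_mem hq)
          simp [hq1]
        simp [ht]
      · rw [List.map_cons] at hk
        have hk' : k ∈ t.map Prod.fst := by
          rcases List.mem_cons.mp hk with h | h
          · exact absurd h.symm hpk
          · exact h
        have := ih hndt hk'
        have hb : (!(p.1 == k)) = true := by simp [hpk]
        simp only [List.filter_cons, hb]
        simp only [if_true, List.length_cons]
        omega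

-- erasing a present key of a nodup-keyed dict removes exactly one item
theorem pvEraseLenExact {g : PySem.Dict String Int} {k : String}
    (hnd : g.keys.Nodup) (hk : k ∈ g.keys) :
    (g.erase k).items.length + 1 = g.items.length :=
  pvFilterLen g.items k hnd hk

def pvSub (g0 g : PySem.Dict String Int) : Prop := g.items.Sublist g0.items

-- every seen key list of a small enough sub-dict has all its candidates ≤ b
def pvInv (target : Int) (g0 : PySem.Dict String Int) (n : ℕ)
    (seen : List (List String)) (b : Int) : Prop :=
  ∀ g', pvSub g0 g' → g'.items.length ≤ n → g'.keys ∈ seen →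
    ∀ c ∈ pvCands target g', c.2 ≤ b

-- recursion-shaped view of B's key loop (list accumulator pulled out)
def pvGenLoop (target : Int) (fuel : ℕ) (g : PySem.Dict String Int) :
    List String → List (List String) →
    List (List String × Int) × List (List String)
  | [], seen => ([], seen)
  | k :: rest, seen =>
      let r := check_loop_group_py_alt_cands target fuel (g.erase k) seen
      let r2 := pvGenLoop target fuel g rest r.2
      (r.1 ++ r2.1, r2.2)

theorem pvGenLoop_eq (target : Int) (fuel : ℕ) (g : PySem.Dict String Int) :
    ∀ (ks : List String) (acc : List (List String × Int) × List (List String)),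
      ks.foldl
        (fun acc k =>
          let r := check_loop_group_py_alt_cands target fuel (g.erase k) acc.2
          (acc.1 ++ r.1, r.2)) acc
      = (acc.1 ++ (pvGenLoop target fuel g ks acc.2).1,
         (pvGenLoop target fuel g ks acc.2).2) := by
  intro ks
  induction ks with
  | nil => intro acc; simp [pvGenLoop]
  | cons k rest ih =>
      intro acc
      simp only [List.foldl_cons, pvGenLoop, ih, List.append_assoc]

-- B's generator produces a list whose pvStep-fold equals the fold over the full
-- DFS candidate list, under the seen-set invariant
theorem pvB_main (target : Int) (g0 : PySem.Dict String Int) (h0 : g0.keys.Nodup) :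
    ∀ (fuel : ℕ) (g : PySem.Dict String Int), g.items.length < fuel → pvSub g0 g →
      ∀ (b : List String × Int) (seen : List (List String)),
        pvInv target g0 g.items.length seen b.2 →
        ((check_loop_group_py_alt_cands target fuel g seen).1.foldl pvStep b
            = (pvCands target g).foldl pvStep b) ∧
        pvInv target g0 g.items.length
            (check_loop_group_py_alt_cands target fuel g seen).2
            ((pvCands target g).foldl pvStep b).2 ∧
        ∀ κ ∈ (check_loop_group_py_alt_cands target fuel g seen).2, κ ∈ seen ∨
          ∃ g'', pvSub g0 g'' ∧ g''.items.length ≤ g.items.length ∧ κ = g''.keys := by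
  intro fuel
  induction fuel with
  | zero => intro g hg; omega
  | succ fuel IH =>
    intro g hg hsub b seen hinv
    have hnd : g.keys.Nodup := List.Nodup.sublist (List.Sublist.map _ hsub) h0
    rw [check_loop_group_py_alt_cands]
    by_cases hmem : g.keys ∈ seen
    · simp only [if_pos hmem]
      have hconst : (pvCands target g).foldl pvStep b = b :=
        pvFold_const _ _ (hinv g hsub (le_refl _) hmem)
      refine ⟨by simp [hconst], ?_, fun κ hκ => Or.inl hκ⟩
      rw [hconst]; exact hinv
    · simp only [if_neg hmem]
      by_cases hp : g.values.foldl (fun a c => a * c) 1 ≤ target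
      · simp only [if_pos hp]
        have hcands : pvCands target g
            = [(g.keys, g.values.foldl (fun a c => a * c) 1)] := by
          rw [pvCands]; simp only [if_pos hp]
        refine ⟨by rw [hcands], ?_, ?_⟩
        · intro g' hsub' hlen' hmem' c hc
          rcases (PySem.Set.mem_add seen g.keys g'.keys).mp hmem' with h | h
          · refine le_trans (hinv g' hsub' hlen' h c hc) ?_
            rw [hcands]
            exact pvStep_ge_left b _
          · have hgg : g' = g := pvDictInj h0 hsub' hsub h
            subst hgg
            rw [hcands] at hc ⊢
            rcases List.mem_singleton.mp hc with rfl
            exact pvStep_ge_right b _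
        · intro κ hκ
          rcases (PySem.Set.mem_add seen g.keys κ).mp hκ with h | h
          · exact Or.inl h
          · exact Or.inr ⟨g, hsub, le_refl _, h⟩
      · simp only [if_neg hp]
        have hcands : pvCands target g = pvCandsList target g g.keys.attach := by
          rw [pvCands]; simp only [if_neg hp]
        have hloop : ∀ (ks : List {k // k ∈ g.keys}) (b : List String × Int)
            (seen : List (List String)),
            pvInv target g0 (g.items.length - 1) seen b.2 →
            ((pvGenLoop target fuel g (ks.map Subtype.val) seen).1.foldl pvStep b
                = (pvCandsList target g ks).foldl pvStep b) ∧
            pvInv target g0 (g.items.length - 1)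
                (pvGenLoop target fuel g (ks.map Subtype.val) seen).2
                ((pvCandsList target g ks).foldl pvStep b).2 ∧
            ∀ κ ∈ (pvGenLoop target fuel g (ks.map Subtype.val) seen).2, κ ∈ seen ∨
              ∃ g'', pvSub g0 g'' ∧ g''.items.length ≤ g.items.length - 1 ∧
                κ = g''.keys := by
          intro ks
          induction ks with
          | nil =>
              intro b seen hinv'
              rw [List.map_nil, pvGenLoop, pvCandsList]
              exact ⟨rfl, hinv', fun κ hκ => Or.inl hκ⟩
          | cons k rest ihks =>
              intro b seen hinv'
              rw [List.map_cons, pvGenLoop, pvCandsList]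
              have hklen : (g.erase k.1).items.length = g.items.length - 1 := by
                have := pvEraseLenExact hnd k.2; omega
              have hpos : 0 < g.items.length := by
                simpa [PySem.Dict.keys] using List.length_pos_of_mem k.2
              have hchild := IH (g.erase k.1) (by omega)
                (List.Sublist.trans List.filter_sublist hsub) b seen
                (by rw [hklen]; exact hinv')
              obtain ⟨hc1, hc2, hc3⟩ := hchild
              rw [hklen] at hc2 hc3
              obtain ⟨hr1, hr2, hr3⟩ :=
                ihks ((pvCands target (g.erase k.1)).foldl pvStep b)
                  (check_loop_group_py_alt_cands target fuel (g.erase k.1) seen).2 hc2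
              refine ⟨?_, ?_, ?_⟩
              · simp only [List.foldl_append, hc1, hr1]
              · simpa only [List.foldl_append] using hr2
              · intro κ hκ
                rcases hr3 κ hκ with h | h
                · rcases hc3 κ h with h' | ⟨g'', hs, hl, he⟩
                  · exact Or.inl h'
                  · exact Or.inr ⟨g'', hs, hl, he⟩
                · exact Or.inr h
        have hinv1 : pvInv target g0 (g.items.length - 1)
            (PySem.Set.add seen g.keys) b.2 := by
          intro g' hsub' hlen' hmem' c hc
          rcases (PySem.Set.mem_add seen g.keys g'.keys).mp hmem' with h | h
          · exact hinv g' hsub' (le_trans hlen' (Nat.sub_le _ _)) h c hc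
          · have hgg : g' = g := pvDictInj h0 hsub' hsub h
            subst hgg
            have h0len : g'.items.length = 0 := by omega
            have hkeys : g'.keys = [] := by
              simpa [PySem.Dict.keys] using List.eq_nil_of_length_eq_zero h0len
            have hattach : g'.keys.attach = [] := List.attach_eq_nil_iff.mpr hkeys
            rw [pvCands] at hc
            by_cases hple : g'.values.foldl (fun a c => a * c) 1 ≤ target
            · exact absurd hple hp
            · rw [if_neg hple, hattach, pvCandsList] at hc
              cases hc
        have hmapval : g.keys.attach.map Subtype.val = g.keys :=
          List.attach_map_subtype_val g.keys
        obtain ⟨hl1, hl2, hl3⟩ := hloop g.keys.attach b _ hinv1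
        rw [hmapval] at hl1 hl2 hl3
        rw [pvGenLoop_eq]
        refine ⟨?_, ?_, ?_⟩
        · simp only [List.nil_append]
          rw [hcands]; exact hl1
        · rw [hcands]
          intro g' hsub' hlen' hmem' c hc
          rcases hl3 _ hmem' with h | ⟨g'', hs, hl'', he⟩
          · rcases (PySem.Set.mem_add seen g.keys g'.keys).mp h with h' | h'
            · refine le_trans (hinv g' hsub' hlen' h' c hc) (pvFold_ge_init _ _)
            · have hgg : g' = g := pvDictInj h0 hsub' hsub h'
              subst hgg
              rw [hcands] at hc
              exact pvFold_ge_mem _ _ _ hc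
          · have hgg : g' = g'' := pvDictInj h0 hsub' hs he
            subst hgg
            exact hl2 g' hsub' (by omega) hmem' c hc
        · intro κ hκ
          rcases hl3 κ hκ with h | ⟨g'', hs, hl'', he⟩
          · rcases (PySem.Set.mem_add seen g.keys κ).mp h with h' | h'
            · exact Or.inl h'
            · exact Or.inr ⟨g, hsub, le_refl _, h'⟩
          · exact Or.inr ⟨g'', hs, le_trans hl'' (Nat.sub_le _ _), he⟩

-- ===== VERDICT (by name: the statement is the Claim_ definition above) =====
theorem check_loop_group_py_spec : Claim_equal_check_loop_group_py := by
  intro group target wc _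
  unfold Spec_check_loop_group_py check_loop_group_py check_loop_group_py_alt
  have hA := pvA_main target (PySem.Dict.ofList group).items.length _ (le_refl _) wc
  have hB := pvB_main target (PySem.Dict.ofList group)
      (PySem.Dict.nodup_keys_ofList group)
      ((PySem.Dict.ofList group).items.length + 1) _ (Nat.lt_succ_self _)
      (List.Sublist.refl _) wc []
      (fun g' _ _ hmem => absurd hmem (List.not_mem_nil))
  rw [hA, ← hB.1]
  rfl
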